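-- pv_equiv track=rewrite | github.com/takuto-oono/Atcoder | C-Robot_Takahashi.py | full_search
-- ===== SOURCE A (Python) =====
-- from typing import List, Generator
--
-- def create_adult_list(w_list: List[int], s_list: List[str]) -> Generator[int, None, None]:
--     for i, s in enumerate(s_list):
--         if s == '1':
--             yield w_list[i]
--
-- def create_child_list(w_list: List[int], s_list: List[str]) -> Generator[int, None, None]:
--     for i, s in enumerate(s_list):
--         if s == '0':
--             yield w_list[i]
--
-- def cnt_ok_children(child_list: List[int], x: int) -> int:
--     import bisect
--     return bisect.bisect_left(child_list, x)
--
-- def full_search(w_list: List[int], s_list: List[str]) -> int: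
--     ans = 0
--     child_list = sorted([w for w in create_child_list(w_list, s_list)])
--     adult_list = sorted([w for w in create_adult_list(w_list, s_list)])
--     cnt_adult = len(adult_list)
--     cnt_child = len(child_list)
--
--     if cnt_child == 0:
--         return cnt_adult
--     if cnt_adult == 0:
--         return cnt_child
--
--     for i, adult_weight in enumerate(adult_list):
--         ans = max(cnt_adult - i + cnt_ok_children(child_list, adult_weight), ans)
--     return ans
-- ===== SOURCE B (Python) =====
-- def full_search(w_list, s_list):
--     pairs = list(zip(w_list, s_list))
--     child_list = sorted(w for w, s in pairs if s == '0')
--     adult_list = sorted(w for w, s in pairs if s == '1')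
--     cnt_adult = len(adult_list)
--     cnt_child = len(child_list)
--     if cnt_child == 0:
--         return cnt_adult
--     if cnt_adult == 0:
--         return cnt_child
--     ans = 0
--     j = 0
--     for i, a in enumerate(adult_list):
--         while j < cnt_child and child_list[j] < a:
--             j += 1
--         ans = max(ans, cnt_adult - i + j)
--     return ans
-- ===== Notes on version B (the rewrite author's own statement) =====
-- stated objective: alternative
-- what changed: Replaces A's per-adult bisect_left binary searches with a single forward two-pointer merge over the two sorted lists (a running child index serves as the count of children below the current adult weight), and pairs weights with flags via zip instead of indexing by enumerate position.
import Mathlib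
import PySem

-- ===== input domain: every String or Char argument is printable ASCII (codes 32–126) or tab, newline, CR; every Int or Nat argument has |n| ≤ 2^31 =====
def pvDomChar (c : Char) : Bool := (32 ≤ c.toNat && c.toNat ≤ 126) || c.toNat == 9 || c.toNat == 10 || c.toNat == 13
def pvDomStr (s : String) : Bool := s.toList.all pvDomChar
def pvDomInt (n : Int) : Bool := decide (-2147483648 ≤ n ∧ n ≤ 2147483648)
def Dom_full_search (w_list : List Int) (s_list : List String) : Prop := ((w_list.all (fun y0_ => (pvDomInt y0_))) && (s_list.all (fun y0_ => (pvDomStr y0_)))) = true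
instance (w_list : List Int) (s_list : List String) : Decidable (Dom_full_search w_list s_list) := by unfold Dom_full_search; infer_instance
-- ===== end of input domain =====

-- B replaces A's per-adult bisect_left binary searches with a single forward two-pointer
-- merge over the two sorted lists (alternative decomposition, same asymptotic cost).


-- ===== PORT A =====
-- generator create_adult_list: for i, s in enumerate(s_list): if s == '1': yield w_list[i]
-- (w_list[i] with a nonnegative in-range index — Pre_ guarantees i < len(w_list); getD is exact there)
def create_adult_go (w_list : List Int) : List String → Nat → List Int
  | [], _ => []
  | s :: rest, i =>
      if s = "1" then w_list.getD i 0 :: create_adult_go w_list rest (i + 1)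
      else create_adult_go w_list rest (i + 1)

def create_adult_list (w_list : List Int) (s_list : List String) : List Int :=
  create_adult_go w_list s_list 0

def create_child_go (w_list : List Int) : List String → Nat → List Int
  | [], _ => []
  | s :: rest, i =>
      if s = "0" then w_list.getD i 0 :: create_child_go w_list rest (i + 1)
      else create_child_go w_list rest (i + 1)

def create_child_list (w_list : List Int) (s_list : List String) : List Int :=
  create_child_go w_list s_list 0

def cnt_ok_children (child_list : List Int) (x : Int) : Int :=
  (PySem.List.bisectLeft child_list x : Int)

-- for i, adult_weight in enumerate(adult_list): ans = max(cnt_adult - i + cnt_ok_children(child_list, adult_weight), ans)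
def full_search_loop (cnt_adult : Int) (child_list : List Int) : List Int → Nat → Int → Int
  | [], _, ans => ans
  | a :: rest, i, ans =>
      full_search_loop cnt_adult child_list rest (i + 1)
        (max (cnt_adult - (i : Int) + cnt_ok_children child_list a) ans)

def full_search (w_list : List Int) (s_list : List String) : Int :=
  let child_list := PySem.List.sorted (create_child_list w_list s_list) (fun w => w)
  let adult_list := PySem.List.sorted (create_adult_list w_list s_list) (fun w => w)
  let cnt_adult : Int := adult_list.length
  let cnt_child : Int := child_list.length
  if cnt_child = 0 then cnt_adult
  else if cnt_adult = 0 then cnt_child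
  else full_search_loop cnt_adult child_list adult_list 0 0

-- ===== PORT B =====
-- genexp (w for w, s in pairs if s == flag)
def pick_by_flag (flag : String) : List (Int × String) → List Int
  | [] => []
  | (w, s) :: rest =>
      if s = flag then w :: pick_by_flag flag rest else pick_by_flag flag rest

-- while j < cnt_child and child_list[j] < a: j += 1
def alt_advance (child_list : List Int) (cnt_child : Nat) (a : Int) (j : Nat) : Nat :=
  if h : j < cnt_child ∧ child_list.getD j 0 < a then
    alt_advance child_list cnt_child a (j + 1)
  else j
termination_by cnt_child - j
decreasing_by
  obtain ⟨h1, -⟩ := h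
  omega

-- for i, a in enumerate(adult_list): advance j; ans = max(ans, cnt_adult - i + j)
def alt_loop (cnt_adult : Int) (cnt_child : Nat) (child_list : List Int) :
    List Int → Nat → Nat → Int → Int
  | [], _, _, ans => ans
  | a :: rest, i, j, ans =>
      let j' := alt_advance child_list cnt_child a j
      alt_loop cnt_adult cnt_child child_list rest (i + 1) j'
        (max ans (cnt_adult - (i : Int) + (j' : Int)))

def full_search_alt (w_list : List Int) (s_list : List String) : Int :=
  let pairs := w_list.zip s_list
  let child_list := PySem.List.sorted (pick_by_flag "0" pairs) (fun w => w)
  let adult_list := PySem.List.sorted (pick_by_flag "1" pairs) (fun w => w)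
  let cnt_adult : Int := adult_list.length
  let cnt_child : Int := child_list.length
  if cnt_child = 0 then cnt_adult
  else if cnt_adult = 0 then cnt_child
  else alt_loop cnt_adult child_list.length child_list adult_list 0 0 0

-- ===== PRECONDITION & SPEC =====
-- Pre_ excludes exactly the inputs on which A raises IndexError: some position i of s_list
-- carries flag '0' or '1' but i is out of range for w_list.
def Pre_full_search (w_list : List Int) (s_list : List String) : Prop :=
  ∀ i : Fin s_list.length, (s_list.get i = "0" ∨ s_list.get i = "1") → (i : Nat) < w_list.length
instance (w_list : List Int) (s_list : List String) : Decidable (Pre_full_search w_list s_list) := by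
  unfold Pre_full_search; infer_instance

def pvWitness_full_search : List Int × List String := ([60, 45, 30, 45], ["1", "0", "0", "1"])

def Spec_full_search (w_list : List Int) (s_list : List String) (out : Int) : Prop := out = full_search_alt w_list s_list
instance (w_list : List Int) (s_list : List String) (out : Int) : Decidable (Spec_full_search w_list s_list out) := by unfold Spec_full_search; infer_instance

-- ===== CLAIM (what is proved, stated in full; the proofs are below) =====
def Claim_equal_full_search : Prop := ∀ (w_list : List Int) (s_list : List String), Dom_full_search w_list s_list → Pre_full_search w_list s_list → Spec_full_search w_list s_list (full_search w_list s_list)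

-- ===== LEMMAS AND PROOFS =====

-- number of elements strictly below x in c (= bisect_left on a sorted c)
def twLen (c : List Int) (x : Int) : Nat := (c.takeWhile (fun y => decide (y < x))).length

theorem twLen_le (c : List Int) (x : Int) : twLen c x ≤ c.length :=
  List.IsPrefix.length_le (List.takeWhile_prefix _)

theorem twLen_cons_pos (a x : Int) (rest : List Int) (ha : a < x) :
    twLen (a :: rest) x = twLen rest x + 1 := by
  simp [twLen, ha]

theorem twLen_cons_neg (a x : Int) (rest : List Int) (ha : ¬ a < x) :
    twLen (a :: rest) x = 0 := by
  simp [twLen, ha]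

theorem twLen_lt_of_getD (c : List Int) (x : Int) (k : Nat) (hk : k < twLen c x) :
    c.getD k 0 < x := by
  induction c generalizing k with
  | nil => simp [twLen] at hk
  | cons a rest ih =>
    by_cases ha : a < x
    · cases k with
      | zero => simpa using ha
      | succ m =>
        rw [twLen_cons_pos _ _ _ ha] at hk
        simpa using ih m (by omega)
    · rw [twLen_cons_neg _ _ _ ha] at hk
      omega

theorem twLen_not_lt (c : List Int) (x : Int) (h : twLen c x < c.length) :
    ¬ c.getD (twLen c x) 0 < x := by
  induction c with
  | nil => simp at h
  | cons a rest ih =>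
    by_cases ha : a < x
    · rw [twLen_cons_pos _ _ _ ha] at h ⊢
      simpa using ih (by simpa using h)
    · rw [twLen_cons_neg _ _ _ ha]
      simpa using ha

theorem twLen_mono (c : List Int) (x y : Int) (hxy : x ≤ y) : twLen c x ≤ twLen c y := by
  induction c with
  | nil => simp [twLen]
  | cons a rest ih =>
    by_cases ha : a < x
    · rw [twLen_cons_pos _ _ _ ha, twLen_cons_pos _ _ _ (lt_of_lt_of_le ha hxy)]
      omega
    · rw [twLen_cons_neg _ _ _ ha]
      omega

theorem bisect_eq_twLen (c : List Int) (x : Int) (hs : c.Pairwise (· ≤ ·)) :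
    PySem.List.bisectLeft c x = twLen c x := by
  obtain ⟨hle, hlt, hge⟩ := PySem.List.bisectLeft_spec c x hs
  by_contra hne
  rcases Nat.lt_or_ge (PySem.List.bisectLeft c x) (twLen c x) with h | h
  · have hb : PySem.List.bisectLeft c x < c.length := lt_of_lt_of_le h (twLen_le c x)
    have h1 := twLen_lt_of_getD c x _ h
    rw [List.getD_eq_getElem _ _ hb] at h1
    exact absurd h1 (not_lt.mpr (hge _ hb (le_refl _)))
  · have h' : twLen c x < PySem.List.bisectLeft c x := lt_of_le_of_ne h (fun e => hne e.symm)
    have ht : twLen c x < c.length := lt_of_lt_of_le h' hle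
    have h2 := hlt _ ht h'
    rw [← List.getD_eq_getElem _ (0 : Int) ht] at h2
    exact twLen_not_lt c x ht h2

theorem advance_eq (c : List Int) (a : Int) :
    ∀ (k j : Nat), twLen c a - j = k → j ≤ twLen c a →
      alt_advance c c.length a j = twLen c a := by
  intro k
  induction k with
  | zero =>
    intro j hk hj
    have hj' : j = twLen c a := by omega
    subst hj'
    rw [alt_advance]
    by_cases hl : twLen c a < c.length
    · rw [dif_neg (fun hcontra => twLen_not_lt c a hl hcontra.2)]
    · rw [dif_neg (fun hcontra => hl hcontra.1)]
  | succ m ih =>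
    intro j hk hj
    have hjlt : j < twLen c a := by omega
    have hjl : j < c.length := lt_of_lt_of_le hjlt (twLen_le c a)
    rw [alt_advance]
    rw [dif_pos ⟨hjl, twLen_lt_of_getD c a j hjlt⟩]
    exact ih (j + 1) (by omega) (by omega)

theorem loop_eq (N : Int) (c : List Int) (hc : c.Pairwise (· ≤ ·)) :
    ∀ (as : List Int), as.Pairwise (· ≤ ·) → ∀ (i j : Nat) (ans : Int),
      (∀ a ∈ as, j ≤ twLen c a) →
      alt_loop N c.length c as i j ans = full_search_loop N c as i ans := by
  intro as
  induction as with
  | nil => intro _ i j ans _; rfl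
  | cons a rest ih =>
    intro hp i j ans hj
    have hja : j ≤ twLen c a := hj a (by simp)
    have hhead : ∀ b ∈ rest, a ≤ b := fun b hb => (List.pairwise_cons.mp hp).1 b hb
    have hrest : rest.Pairwise (· ≤ ·) := (List.pairwise_cons.mp hp).2
    show alt_loop N c.length c rest (i + 1) (alt_advance c c.length a j)
        (max ans (N - (i : Int) + ((alt_advance c c.length a j : Nat) : Int)))
      = full_search_loop N c rest (i + 1) (max (N - (i : Int) + cnt_ok_children c a) ans)
    rw [advance_eq c a (twLen c a - j) j rfl hja]
    rw [ih hrest (i + 1) (twLen c a)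
      (max ans (N - (i : Int) + ((twLen c a : Nat) : Int)))
      (fun b hb => twLen_mono c a b (hhead b hb))]
    congr 1
    rw [max_comm]
    congr 2
    simp [cnt_ok_children, bisect_eq_twLen c a hc]

theorem gen_eq_adult (w : List Int) :
    ∀ (s : List String) (i : Nat),
      (∀ k : Fin s.length, (s.get k = "0" ∨ s.get k = "1") → i + (k : Nat) < w.length) →
      create_adult_go w s i = pick_by_flag "1" ((w.drop i).zip s) := by
  intro s
  induction s with
  | nil => intro i _; simp [create_adult_go, pick_by_flag]
  | cons t rest ih =>
    intro i hpre
    have hrest : ∀ k : Fin rest.length, (rest.get k = "0" ∨ rest.get k = "1") →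
        (i + 1) + (k : Nat) < w.length := by
      intro k hk
      have h2 : i + ((k : Nat) + 1) < w.length :=
        hpre ⟨(k : Nat) + 1, by simp⟩ (by simpa using hk)
      omega
    by_cases hi : i < w.length
    · rw [← List.getElem_cons_drop hi]
      by_cases ht : t = "1"
      · simp only [create_adult_go, ht, if_true, List.zip_cons_cons, pick_by_flag, if_true]
        rw [List.getD_eq_getElem _ _ hi, ih (i + 1) hrest]
      · simp only [create_adult_go, ht, if_false, List.zip_cons_cons, pick_by_flag]
        exact ih (i + 1) hrest
    · have ht : ¬ (t = "0" ∨ t = "1") := by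
        intro h
        exact hi (by simpa using hpre ⟨0, by simp⟩ (by simpa using h))
      have ht1 : t ≠ "1" := fun h => ht (Or.inr h)
      have hd : w.drop i = [] := List.drop_eq_nil_of_le (by omega)
      have hd' : w.drop (i + 1) = [] := List.drop_eq_nil_of_le (by omega)
      simp only [create_adult_go, ht1, if_false, hd, List.zip_nil_left, pick_by_flag]
      rw [ih (i + 1) hrest, hd', List.zip_nil_left]
      rfl

theorem gen_eq_child (w : List Int) :
    ∀ (s : List String) (i : Nat),
      (∀ k : Fin s.length, (s.get k = "0" ∨ s.get k = "1") → i + (k : Nat) < w.length) →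
      create_child_go w s i = pick_by_flag "0" ((w.drop i).zip s) := by
  intro s
  induction s with
  | nil => intro i _; simp [create_child_go, pick_by_flag]
  | cons t rest ih =>
    intro i hpre
    have hrest : ∀ k : Fin rest.length, (rest.get k = "0" ∨ rest.get k = "1") →
        (i + 1) + (k : Nat) < w.length := by
      intro k hk
      have h2 : i + ((k : Nat) + 1) < w.length :=
        hpre ⟨(k : Nat) + 1, by simp⟩ (by simpa using hk)
      omega
    by_cases hi : i < w.length
    · rw [← List.getElem_cons_drop hi]
      by_cases ht : t = "0"
      · simp only [create_child_go, ht, if_true, List.zip_cons_cons, pick_by_flag, if_true]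
        rw [List.getD_eq_getElem _ _ hi, ih (i + 1) hrest]
      · simp only [create_child_go, ht, if_false, List.zip_cons_cons, pick_by_flag]
        exact ih (i + 1) hrest
    · have ht : ¬ (t = "0" ∨ t = "1") := by
        intro h
        exact hi (by simpa using hpre ⟨0, by simp⟩ (by simpa using h))
      have ht0 : t ≠ "0" := fun h => ht (Or.inl h)
      have hd : w.drop i = [] := List.drop_eq_nil_of_le (by omega)
      have hd' : w.drop (i + 1) = [] := List.drop_eq_nil_of_le (by omega)
      simp only [create_child_go, ht0, if_false, hd, List.zip_nil_left, pick_by_flag]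
      rw [ih (i + 1) hrest, hd', List.zip_nil_left]
      rfl

-- ===== VERDICT (by name: the statement is the Claim_ definition above) =====
theorem full_search_spec : Claim_equal_full_search := by
  intro w s _ hpre
  unfold Spec_full_search full_search full_search_alt
  have hadult : create_adult_list w s = pick_by_flag "1" (w.zip s) := by
    have := gen_eq_adult w s 0 (by intro k hk; simpa using hpre k hk)
    simpa [create_adult_list] using this
  have hchild : create_child_list w s = pick_by_flag "0" (w.zip s) := by
    have := gen_eq_child w s 0 (by intro k hk; simpa using hpre k hk)
    simpa [create_child_list] using this
  rw [hadult, hchild]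
  dsimp only
  split_ifs with h1 h2
  · rfl
  · rfl
  · exact (loop_eq _ _ (PySem.List.sorted_pairwise _ _) _
      (PySem.List.sorted_pairwise _ _) 0 0 0 (fun _ _ => Nat.zero_le _)).symm
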